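-- pv_equiv track=rewrite | github.com/cristinamariani/Markov_process_Simulation | Functions.py | check_rnd_walk
-- ===== SOURCE A (Python) =====
-- def check_rnd_walk(path):
--     """This function checks that the random walk does not contain transitions with transition probability equal to 0.
--
--     Parameters
--     ----------
--     path (list): random walk "traveled" by the system
--
--     Returns
--     -------
--     bool: True if the random walk does not travel forbidden transitions, False otherwise
--     """
--     forbidden_transitions = [['B', 'D'], ['C', 'H'], ['E', 'A'], ['E', 'B'], ['F', 'E'], ['H', 'G']] #couples of states which have transition probability = 0
--     i = 1
--     while i < len(path):
--         if [path[i-1], path[i]] in forbidden_transitions: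
--             return False
--             raise ValueError("Forbidden transition made!")
--         i += 1
--     return True
-- ===== SOURCE B (Python) =====
-- def check_rnd_walk(path):
--     """For each forbidden transition (a, b), repeatedly locate occurrences of the
--     source state a with list.index and inspect the successor element, instead of
--     scanning every adjacent pair against a collection of forbidden pairs."""
--     forbidden = [('B', 'D'), ('C', 'H'), ('E', 'A'), ('E', 'B'), ('F', 'E'), ('H', 'G')]
--
--     def occurs(a, b):
--         i = 0
--         while True:
--             try:
--                 i = path.index(a, i)
--             except ValueError:
--                 return False
--             if i + 1 < len(path) and path[i + 1] == b:
--                 return True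
--             i += 1
--
--     return not any(occurs(a, b) for a, b in forbidden)
-- ===== Notes on version B (the rewrite author's own statement) =====
-- stated objective: alternative
-- what changed: Instead of A's single index scan testing each adjacent pair for membership in a list of forbidden 2-lists, B iterates over the six forbidden transitions and, for each (a,b), searches the path for occurrences of the source state a via list.index and checks only the successor of each hit.
import Mathlib
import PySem

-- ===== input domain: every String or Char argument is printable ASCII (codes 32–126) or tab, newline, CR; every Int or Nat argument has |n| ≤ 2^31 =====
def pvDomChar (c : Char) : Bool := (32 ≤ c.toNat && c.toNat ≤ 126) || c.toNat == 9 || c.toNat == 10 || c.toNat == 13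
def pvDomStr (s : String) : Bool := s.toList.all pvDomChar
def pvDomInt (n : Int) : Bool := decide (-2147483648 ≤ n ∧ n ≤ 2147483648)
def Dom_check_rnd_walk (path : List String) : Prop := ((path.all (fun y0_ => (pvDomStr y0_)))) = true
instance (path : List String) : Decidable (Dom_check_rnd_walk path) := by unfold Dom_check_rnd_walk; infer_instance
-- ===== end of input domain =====

-- B replaces A's scan of every adjacent pair against a forbidden-pair list by, for each
-- of the six forbidden transitions (a,b), a list.index search for occurrences of a
-- followed by a check of the successor (alternative decomposition; same asymptotic cost).

-- ===== PORT A =====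
-- forbidden_transitions = [['B','D'], …] (pairs of states; list of 2-lists ported as list of pairs)
def forbidden_transitions_A : List (String × String) :=
  [("B", "D"), ("C", "H"), ("E", "A"), ("E", "B"), ("F", "E"), ("H", "G")]

-- the 'while i < len(path)' loop, i starting at 1; path[i-1]/path[i] are in range when i < len
def check_rnd_walk_loop (path : List String) (i : Nat) : Bool :=
  if i < path.length then
    if (path.getD (i - 1) "", path.getD i "") ∈ forbidden_transitions_A then
      false
    else
      check_rnd_walk_loop path (i + 1)
  else
    true
termination_by path.length - i

def check_rnd_walk (path : List String) : Bool :=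
  check_rnd_walk_loop path 1

-- ===== PORT B =====
def forbidden_B : List (String × String) :=
  [("B", "D"), ("C", "H"), ("E", "A"), ("E", "B"), ("F", "E"), ("H", "G")]

-- occurs(a, b)'s while loop: i = path.index(a, start) (none = ValueError → return False);
-- if path[i+1] == b (in range) return True, else continue searching from i + 1
def occursFrom (path : List String) (a b : String) (start : Nat) : Bool :=
  match h : PySem.List.index? (path.drop start) a with
  | none => false
  | some k =>
      if start + k + 1 < path.length && (path.getD (start + k + 1) "" == b) then true
      else occursFrom path a b (start + k + 1)
termination_by path.length - start
decreasing_by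
  have := PySem.List.getElem_of_index?_eq_some h
  obtain ⟨hk, -, -⟩ := this
  have : start < path.length := by
    by_contra hc
    simp [List.drop_eq_nil_of_le (le_of_not_gt hc)] at hk
  omega

def check_rnd_walk_alt (path : List String) : Bool :=
  !(forbidden_B.any (fun p => occursFrom path p.1 p.2 0))

-- ===== PRECONDITION & SPEC =====
def Spec_check_rnd_walk (path : List String) (out : Bool) : Prop := out = check_rnd_walk_alt path
instance (path : List String) (out : Bool) : Decidable (Spec_check_rnd_walk path out) := by unfold Spec_check_rnd_walk; infer_instance

-- ===== CLAIM =====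
def Claim_equal_check_rnd_walk : Prop := ∀ (path : List String), Dom_check_rnd_walk path → Spec_check_rnd_walk path (check_rnd_walk path)

-- ===== LEMMAS AND PROOFS =====

-- both sides are characterised by this existential: a forbidden adjacent (a,b) at position ≥ start
def HasPair (path : List String) (a b : String) (start : Nat) : Prop :=
  ∃ i, start ≤ i ∧ i + 1 < path.length ∧ path[i]? = some a ∧ path[i + 1]? = some b

-- A's loop from index i returns false iff some adjacent forbidden pair occurs at position ≥ i-1
lemma check_rnd_walk_loop_iff (path : List String) (i : Nat) (hi : 1 ≤ i) :
    check_rnd_walk_loop path i = false ↔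
      ∃ p ∈ forbidden_transitions_A, HasPair path p.1 p.2 (i - 1) := by
  rw [check_rnd_walk_loop]
  by_cases hlen : i < path.length
  · rw [if_pos hlen]
    have h1 : path[i-1]? = some (path.getD (i-1) "") := by
      rw [List.getD_eq_getElem?_getD, List.getElem?_eq_getElem (by omega)]; rfl
    have h2 : path[i]? = some (path.getD i "") := by
      rw [List.getD_eq_getElem?_getD, List.getElem?_eq_getElem hlen]; rfl
    by_cases hmem : (path.getD (i - 1) "", path.getD i "") ∈ forbidden_transitions_A
    · rw [if_pos hmem]
      simp only [true_iff]
      exact ⟨_, hmem, i - 1, le_rfl, by omega, by rw [h1], by rw [show i - 1 + 1 = i from by omega, h2]⟩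
    · rw [if_neg hmem, check_rnd_walk_loop_iff path (i + 1) (by omega)]
      constructor
      · rintro ⟨p, hp, j, hj, hlt, ha, hb⟩
        exact ⟨p, hp, j, by omega, hlt, ha, hb⟩
      · rintro ⟨p, hp, j, hj, hlt, ha, hb⟩
        refine ⟨p, hp, j, ?_, hlt, ha, hb⟩
        rcases Nat.lt_or_ge j i with hji | hji
        · exfalso
          have hj1 : j = i - 1 := by omega
          subst hj1
          rw [show i - 1 + 1 = i from by omega] at hb
          rw [h1] at ha; rw [h2] at hb
          have hpq : (path.getD (i - 1) "", path.getD i "") = p :=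
            Prod.ext_iff.mpr ⟨Option.some_inj.mp ha, Option.some_inj.mp hb⟩
          exact hmem (hpq ▸ hp)
        · omega
  · rw [if_neg hlen]
    simp only [Bool.true_eq_false, false_iff]
    rintro ⟨p, hp, j, hj, hlt, ha, hb⟩
    omega
termination_by path.length - i

lemma occursFrom_iff (path : List String) (a b : String) (start : Nat) :
    occursFrom path a b start = true ↔ HasPair path a b start := by
  rw [occursFrom]
  split
  next h =>
    rw [PySem.List.index?_eq_none_iff] at h
    simp only [Bool.false_eq_true, false_iff]
    rintro ⟨i, hsi, hlt, ha, hb⟩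
    apply h
    have : (path.drop start)[i - start]? = some a := by
      rw [List.getElem?_drop, show start + (i - start) = i from by omega, ha]
    exact List.mem_of_getElem? this
  next k h =>
    obtain ⟨hk, hka, hpre⟩ := PySem.List.getElem_of_index?_eq_some h
    have hslen : start + k < path.length := by
      have hd := List.length_drop (i := start) (l := path)
      omega
    have hga : path[start + k]? = some a := by
      rw [← List.getElem?_drop, List.getElem?_eq_getElem hk, hka]
    split_ifs with hcnd
    · rw [Bool.and_eq_true, beq_iff_eq, decide_eq_true_eq] at hcnd
      obtain ⟨hlt, hb⟩ := hcnd
      simp only [true_iff]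
      refine ⟨start + k, by omega, hlt, hga, ?_⟩
      rw [List.getD_eq_getElem?_getD, List.getElem?_eq_getElem hlt, Option.getD_some] at hb
      rw [List.getElem?_eq_getElem hlt, hb]
    · rw [occursFrom_iff path a b (start + k + 1)]
      constructor
      · rintro ⟨i, hsi, hlt, ha, hb⟩
        exact ⟨i, by omega, hlt, ha, hb⟩
      · rintro ⟨i, hsi, hlt, ha, hb⟩
        refine ⟨i, ?_, hlt, ha, hb⟩
        rcases Nat.lt_or_ge i (start + k + 1) with hik | hik
        · exfalso
          rcases Nat.lt_or_ge i (start + k) with hik2 | hik2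
          · have hda : (path.drop start)[i - start]? = some a := by
              rw [List.getElem?_drop, show start + (i - start) = i from by omega]
              exact ha
            rw [List.getElem?_eq_getElem (by
              have hd := List.length_drop (i := start) (l := path); omega)] at hda
            exact hpre (i - start) (by omega) (Option.some_inj.mp hda)
          · have : i = start + k := by omega
            subst this
            apply hcnd
            rw [Bool.and_eq_true, beq_iff_eq, decide_eq_true_eq]
            refine ⟨hlt, ?_⟩
            rw [List.getD_eq_getElem?_getD, hb]; rfl
        · omega
termination_by path.length - start
decreasing_by omega

-- ===== VERDICT =====
theorem check_rnd_walk_spec : Claim_equal_check_rnd_walk := by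
  intro path _
  show check_rnd_walk path = check_rnd_walk_alt path
  rw [check_rnd_walk, check_rnd_walk_alt]
  rcases hA : check_rnd_walk_loop path 1 with _ | _
  · have := (check_rnd_walk_loop_iff path 1 le_rfl).mp hA
    obtain ⟨p, hp, hpair⟩ := this
    have : forbidden_B.any (fun p => occursFrom path p.1 p.2 0) = true := by
      rw [List.any_eq_true]
      exact ⟨p, hp, (occursFrom_iff path p.1 p.2 0).mpr (by simpa using hpair)⟩
    simp [this]
  · have hno : ¬ ∃ p ∈ forbidden_transitions_A, HasPair path p.1 p.2 0 := by
      intro h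
      have := (check_rnd_walk_loop_iff path 1 le_rfl).mpr (by simpa using h)
      rw [hA] at this; cases this
    have : forbidden_B.any (fun p => occursFrom path p.1 p.2 0) = false := by
      rw [Bool.eq_false_iff]
      intro hc
      rw [List.any_eq_true] at hc
      obtain ⟨p, hp, hocc⟩ := hc
      exact hno ⟨p, hp, (occursFrom_iff path p.1 p.2 0).mp hocc⟩
    simp [this]
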